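-- pv_equiv track=rewrite | github.com/artradeskz/kvs | objdump_readelf/kvs_.py | tokenize_line
-- ===== SOURCE A (Python) =====
-- def error_unterminated_string():
--     return "Незакрытая кавычка в строке"
--
-- def tokenize_line(line):
--     semi = line.find(';')
--     if semi != -1:
--         line = line[:semi]
--     line = line.rstrip()
--     if not line:
--         return []
--     tokens = []
--     i = 0
--     n = len(line)
--     while i < n:
--         ch = line[i]
--         if ch.isspace():
--             i += 1
--             continue
--         if ch == '"':
--             i += 1
--             s = ''
--             while i < n and line[i] != '"':
--                 if line[i] == '\\' and i + 1 < n: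
--                     i += 1
--                     esc = line[i]
--                     if esc == 'n':
--                         s += '\n'
--                     elif esc == 't':
--                         s += '\t'
--                     elif esc == '"':
--                         s += '"'
--                     elif esc == '\\':
--                         s += '\\'
--                     else:
--                         s += '\\' + esc
--                     i += 1
--                 else:
--                     s += line[i]
--                     i += 1
--             if i >= n:
--                 raise ValueError(error_unterminated_string())
--             i += 1
--             tokens.append(('string', s))
--             continue
--         if ch == ',':
--             tokens.append(('comma', ','))
--             i += 1
--             continue
--         if ch == ':':
--             tokens.append(('colon', ':'))
--             i += 1
--             continue
--         j = i
--         while j < n and not (line[j].isspace() or line[j] in ',:;'):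
--             j += 1
--         word = line[i:j]
--         if word:
--             tokens.append(('word', word))
--         i = j
--     return tokens
-- ===== SOURCE B (Python) =====
-- def error_unterminated_string():
--     return "Незакрытая кавычка в строке"
--
-- _ESC = {'n': '\n', 't': '\t', '"': '"', '\\': '\\'}
--
-- def tokenize_line(line):
--     # one-pass DFA over the characters; emits tokens as state transitions fire
--     line = line.split(';', 1)[0].rstrip()
--     tokens = []
--     mode = 'top'          # 'top' | 'word' | 'str'
--     acc = ''
--     esc = False
--     for ch in line:
--         if mode == 'top':
--             if ch == '"':
--                 mode, acc = 'str', ''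
--             elif ch == ',':
--                 tokens.append(('comma', ','))
--             elif ch == ':':
--                 tokens.append(('colon', ':'))
--             elif ch.isspace():
--                 pass
--             else:
--                 mode, acc = 'word', ch
--         elif mode == 'word':
--             if ch.isspace():
--                 tokens.append(('word', acc))
--                 mode = 'top'
--             elif ch == ',':
--                 tokens.append(('word', acc))
--                 tokens.append(('comma', ','))
--                 mode = 'top'
--             elif ch == ':':
--                 tokens.append(('word', acc))
--                 tokens.append(('colon', ':'))
--                 mode = 'top'
--             else:
--                 acc += ch
--         else:  # string
--             if esc:
--                 acc += _ESC.get(ch, '\\' + ch)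
--                 esc = False
--             elif ch == '\\':
--                 esc = True
--             elif ch == '"':
--                 tokens.append(('string', acc))
--                 mode = 'top'
--             else:
--                 acc += ch
--     if mode == 'word':
--         tokens.append(('word', acc))
--     elif mode == 'str':
--         raise ValueError(error_unterminated_string())
--     return tokens
-- ===== Notes on version B (the rewrite author's own statement) =====
-- stated objective: alternative
-- what changed: Replaced A's index-based scanner (outer while with nested inner while-loops and lookahead for strings and words) by a single left-to-right DFA fold with explicit top/word/string states that emits tokens as transitions fire.
import Mathlib
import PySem

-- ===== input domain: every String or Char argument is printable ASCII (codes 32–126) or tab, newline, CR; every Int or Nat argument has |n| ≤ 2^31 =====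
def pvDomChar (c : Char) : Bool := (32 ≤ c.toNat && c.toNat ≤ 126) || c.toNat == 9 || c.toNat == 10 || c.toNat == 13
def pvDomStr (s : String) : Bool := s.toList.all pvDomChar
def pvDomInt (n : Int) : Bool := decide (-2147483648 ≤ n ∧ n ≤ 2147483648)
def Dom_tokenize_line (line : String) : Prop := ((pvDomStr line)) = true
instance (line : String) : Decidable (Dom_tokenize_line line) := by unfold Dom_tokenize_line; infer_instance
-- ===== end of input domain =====

-- B replaces A's index-based scanner (nested while-loops with lookahead) by a single
-- left-to-right DFA fold (states top/word/string) that emits tokens as it goes;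
-- same return value (both raise ValueError on an unterminated string — excluded by Pre_).

-- ===== PORT A =====
-- shared preprocessing of both Pythons: the prefix before the first ';'
-- (= line[:line.find(';')] when ';' occurs, else the whole line)
def pvTrunc (l : List Char) : List Char := l.takeWhile (· ≠ ';')

-- A's inner string loop: accumulates the decoded content; `none` = the loop ran off
-- the end of the line, i.e. Python raises ValueError (unterminated string)
def scanStr : List Char → List Char → Option (List Char × List Char)
  | [], _ => none
  | c :: cs, s =>
    if c = '"' then some (s, cs)
    else if c = '\\' then
      match cs with
      | [] => none   -- A appends '\\' and then falls off the end: it raises, no value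
      | e :: cs' =>
        scanStr cs' (s ++ (if e = 'n' then ['\n'] else if e = 't' then ['\t']
          else if e = '"' then ['"'] else if e = '\\' then ['\\'] else ['\\', e]))
    else scanStr cs (s ++ [c])
  termination_by l _ => l.length

-- A's word loop: while j < n and not (isspace or in ',:;'): j += 1  → (word chars, rest)
def scanWord : List Char → List Char × List Char
  | [] => ([], [])
  | c :: cs =>
    if PySem.Chars.isspace c || c = ',' || c = ':' || c = ';' then ([], c :: cs)
    else ((scanWord cs).1.cons c, (scanWord cs).2)

theorem scanStr_rest (l : List Char) : ∀ s s' r, scanStr l s = some (s', r) → r <:+ l := by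
  intro s s' r h
  fun_induction scanStr l s with
  | case1 => simp at h
  | case2 cs s =>
    simp at h
    exact h.2 ▸ ⟨['\"'], rfl⟩
  | case3 => simp at h
  | case4 s e cs' hne ih =>
    exact (ih h).trans ⟨['\\', e], rfl⟩
  | case5 c cs s hq hb ih =>
    exact (ih h).trans ⟨[c], rfl⟩

theorem scanWord_rest (l : List Char) : (scanWord l).2 <:+ l := by
  induction l with
  | nil => simp [scanWord]
  | cons c cs ih =>
    by_cases h : (PySem.Chars.isspace c || c = ',' || c = ':' || c = ';') = true
    · simp [scanWord, h]
    · simp only [scanWord, h, if_neg]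
      exact ih.trans ⟨[c], rfl⟩

-- A's outer while-loop; the word emitted is nonempty by construction (its first char is
-- not a stop char), so A's `if word:` test is always true here
def loopA : List Char → List (String × String)
  | [] => []
  | c :: cs =>
    if PySem.Chars.isspace c then loopA cs
    else if c = '"' then
      match h : scanStr cs [] with
      | none => []   -- Python raises ValueError here; excluded by Pre_
      | some (s, r) => ("string", String.ofList s) :: loopA r
    else if c = ',' then ("comma", ",") :: loopA cs
    else if c = ':' then ("colon", ":") :: loopA cs
    else ("word", String.ofList (c :: (scanWord cs).1)) :: loopA (scanWord cs).2
  termination_by l => l.length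
  decreasing_by
  all_goals
    (try have := List.IsSuffix.length_le (scanStr_rest cs _ _ _ h)) <;>
    (try have := List.IsSuffix.length_le (scanWord_rest cs)) <;>
    simp <;> omega

def tokenize_line (line : String) : List (String × String) :=
  let t := PySem.Chars.rstrip (pvTrunc line.toList)   -- line = line[:semi]; line = line.rstrip()
  if t.isEmpty then [] else loopA t                    -- if not line: return []

-- ===== PORT B =====
inductive TokSt : Type
  | top : TokSt
  | word : List Char → TokSt
  | str : List Char → Bool → TokSt
deriving DecidableEq, Repr

-- _ESC.get(ch, '\\' + ch)
def escMap (c : Char) : List Char :=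
  match c with
  | 'n' => ['\n'] | 't' => ['\t'] | '"' => ['"'] | '\\' => ['\\']
  | _ => ['\\', c]

def stepB (p : List (String × String) × TokSt) (c : Char) : List (String × String) × TokSt :=
  match p with
  | (toks, TokSt.top) =>
    if c = '"' then (toks, TokSt.str [] false)
    else if c = ',' then (("comma", ",") :: toks, TokSt.top)
    else if c = ':' then (("colon", ":") :: toks, TokSt.top)
    else if PySem.Chars.isspace c then (toks, TokSt.top)
    else (toks, TokSt.word [c])
  | (toks, TokSt.word a) =>
    if PySem.Chars.isspace c then (("word", String.ofList a) :: toks, TokSt.top)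
    else if c = ',' then (("comma", ",") :: ("word", String.ofList a) :: toks, TokSt.top)
    else if c = ':' then (("colon", ":") :: ("word", String.ofList a) :: toks, TokSt.top)
    else (toks, TokSt.word (a ++ [c]))
  | (toks, TokSt.str a esc) =>
    if esc then (toks, TokSt.str (a ++ escMap c) false)
    else if c = '\\' then (toks, TokSt.str a true)
    else if c = '"' then (("string", String.ofList a) :: toks, TokSt.top)
    else (toks, TokSt.str (a ++ [c]) false)

-- the trailing `if mode == 'word' … elif mode == 'str': raise`; tokens were accumulated
-- in reverse.  In the str state Python raises (unterminated string, excluded by Pre_).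
def finB : List (String × String) × TokSt → List (String × String)
  | (toks, TokSt.top) => toks.reverse
  | (toks, TokSt.word a) => (("word", String.ofList a) :: toks).reverse
  | (toks, TokSt.str _ _) => toks.reverse

def tokenize_line_alt (line : String) : List (String × String) :=
  let t := PySem.Chars.rstrip (pvTrunc line.toList)   -- line.split(';', 1)[0].rstrip()
  finB (List.foldl stepB ([], TokSt.top) t)

-- ===== PRECONDITION & SPEC =====
-- Pre_ excludes exactly the lines with an unterminated string literal, on which Python A
-- (and B) raises ValueError.  pok walks the line once with a four-value state
-- (0 top, 1 inside a word, 2 inside a string, 3 after a backslash in a string) and asks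
-- only that the line does not end inside a string.
def pok : List Char → Nat → Bool
  | [], st => st == 0 || st == 1
  | c :: cs, st =>
    match st with
    | 0 => if c = '"' then pok cs 2
           else pok cs (if PySem.Chars.isspace c || c = ',' || c = ':' then 0 else 1)
    | 1 => pok cs (if PySem.Chars.isspace c || c = ',' || c = ':' then 0 else 1)
    | 2 => if c = '\\' then pok cs 3 else if c = '"' then pok cs 0 else pok cs 2
    | 3 => pok cs 2
    | _ => false

def Pre_tokenize_line (line : String) : Prop :=
  pok (PySem.Chars.rstrip (pvTrunc line.toList)) 0 = true

instance (line : String) : Decidable (Pre_tokenize_line line) := by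
  unfold Pre_tokenize_line; infer_instance

def pvWitness_tokenize_line : String := "key: \"a\\n b\", v2 ; comment"

def Spec_tokenize_line (line : String) (out : List (String × String)) : Prop := out = tokenize_line_alt line
instance (line : String) (out : List (String × String)) : Decidable (Spec_tokenize_line line out) := by unfold Spec_tokenize_line; infer_instance

-- ===== CLAIM (what is proved, stated in full; the proofs are below) =====
def Claim_equal_tokenize_line : Prop := ∀ (line : String), Dom_tokenize_line line → Pre_tokenize_line line → Spec_tokenize_line line (tokenize_line line)

-- ===== LEMMAS AND PROOFS =====

-- stop characters are not quotes, backslashes, spaces… — little decide facts used below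
theorem not_space_of_comma : PySem.Chars.isspace ',' = false := by decide
theorem not_space_of_colon : PySem.Chars.isspace ':' = false := by decide
theorem not_space_of_quote : PySem.Chars.isspace '\"' = false := by decide

-- B's word state replays A's word scan
theorem foldB_word (l : List Char) : ∀ toks acc, (';' ∈ l → False) →
    List.foldl stepB (toks, TokSt.word acc) l =
      (if (scanWord l).2.isEmpty then (toks, TokSt.word (acc ++ (scanWord l).1))
       else List.foldl stepB
         (("word", String.ofList (acc ++ (scanWord l).1)) :: toks, TokSt.top) (scanWord l).2) := by
  induction l with
  | nil => intro toks acc _; simp [scanWord]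
  | cons c cs ih =>
    intro toks acc hsemi
    by_cases hstop : (PySem.Chars.isspace c || c = ',' || c = ':') = true
    · have hsw : scanWord (c :: cs) = ([], c :: cs) := by
        simp [scanWord, hstop]
      rw [hsw]
      simp only [List.isEmpty_cons, List.append_nil, if_neg Bool.false_ne_true]
      simp only [List.foldl_cons]
      have hstep : stepB (toks, TokSt.word acc) c
          = stepB (("word", String.ofList acc) :: toks, TokSt.top) c := by
        simp only [Bool.or_eq_true, decide_eq_true_eq] at hstop
        rcases hstop with (hs | rfl) | rfl
        · have h1 : ¬ c = '\"' := by rintro rfl; rw [not_space_of_quote] at hs; exact Bool.false_ne_true hs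
          have h2 : ¬ c = ',' := by rintro rfl; rw [not_space_of_comma] at hs; exact Bool.false_ne_true hs
          have h3 : ¬ c = ':' := by rintro rfl; rw [not_space_of_colon] at hs; exact Bool.false_ne_true hs
          simp [stepB, hs, h1, h2, h3]
        · simp [stepB, not_space_of_comma]
        · simp [stepB, not_space_of_colon]
      rw [hstep]
    · have hc : ¬ c = ';' := fun h => hsemi (h ▸ List.mem_cons_self)
      simp only [Bool.or_eq_true, decide_eq_true_eq, not_or] at hstop
      obtain ⟨⟨hs, h1⟩, h2⟩ := hstop
      have hs' : PySem.Chars.isspace c = false := Bool.eq_false_iff.mpr hs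
      have hsw : scanWord (c :: cs) = ((scanWord cs).1.cons c, (scanWord cs).2) := by
        simp [scanWord, hs', h1, h2, hc]
      rw [hsw]
      simp only [List.foldl_cons]
      have hstep : stepB (toks, TokSt.word acc) c = (toks, TokSt.word (acc ++ [c])) := by
        simp [stepB, hs', h1, h2]
      rw [hstep, ih toks (acc ++ [c]) (fun hm => hsemi (List.mem_cons_of_mem c hm))]
      simp [List.append_assoc]

-- B's _ESC.get(ch, '\\' + ch) is A's if/elif escape chain
theorem escMap_eq (e : Char) : escMap e =
    (if e = 'n' then ['\n'] else if e = 't' then ['\t']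
     else if e = '\"' then ['\"'] else if e = '\\' then ['\\'] else ['\\', e]) := by
  unfold escMap
  split <;> simp_all

-- B's string state replays A's string scan
theorem foldB_str_aux (n : Nat) : ∀ l : List Char, l.length ≤ n → ∀ s toks s' r,
    scanStr l s = some (s', r) →
    List.foldl stepB (toks, TokSt.str s false) l =
      List.foldl stepB (("string", String.ofList s') :: toks, TokSt.top) r := by
  induction n with
  | zero =>
    intro l hl s toks s' r h
    rw [List.length_eq_zero_iff.mp (Nat.le_zero.mp hl)] at h
    simp [scanStr] at h
  | succ n ihn =>
    intro l hl s toks s' r h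
    match l with
    | [] => simp [scanStr] at h
    | c :: cs =>
      by_cases hq : c = '\"'
      · subst hq
        rw [scanStr.eq_def] at h
        simp at h
        obtain ⟨rfl, rfl⟩ := h
        simp [List.foldl_cons, stepB]
      · by_cases hb : c = '\\'
        · subst hb
          match cs with
          | [] => rw [scanStr.eq_def] at h; simp [hq] at h
          | e :: cs' =>
            rw [scanStr.eq_def] at h
            simp only [if_neg hq, if_pos rfl] at h
            simp only [List.foldl_cons]
            have h1 : stepB (toks, TokSt.str s false) '\\' = (toks, TokSt.str s true) := by
              simp [stepB]
            have h2 : stepB (toks, TokSt.str s true) e = (toks, TokSt.str (s ++ escMap e) false) := by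
              simp [stepB]
            rw [h1, h2, escMap_eq]
            refine ihn cs' (by simp at hl; omega) _ toks s' r ?_
            exact h
        · rw [scanStr.eq_def] at h
          simp only [if_neg hq, if_neg hb] at h
          simp only [List.foldl_cons]
          have h1 : stepB (toks, TokSt.str s false) c = (toks, TokSt.str (s ++ [c]) false) := by
            simp [stepB, hq, hb]
          rw [h1]
          exact ihn cs (by simp at hl; omega) _ toks s' r h

theorem foldB_str (l : List Char) : ∀ s toks s' r, scanStr l s = some (s', r) →
    List.foldl stepB (toks, TokSt.str s false) l =
      List.foldl stepB (("string", String.ofList s') :: toks, TokSt.top) r :=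
  foldB_str_aux l.length l le_rfl

-- inside Pre_, A's string scan terminates with a closing quote, and the rest is still ok
theorem pok_str_aux (n : Nat) : ∀ l : List Char, l.length ≤ n → ∀ s, pok l 2 = true →
    ∃ s' r, scanStr l s = some (s', r) ∧ pok r 0 = true := by
  induction n with
  | zero =>
    intro l hl s h
    rw [List.length_eq_zero_iff.mp (Nat.le_zero.mp hl)] at h
    simp [pok] at h
  | succ n ihn =>
    intro l hl s h
    match l with
    | [] => simp [pok] at h
    | c :: cs =>
      by_cases hb : c = '\\'
      · subst hb
        simp only [pok, if_pos rfl] at h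
        match cs with
        | [] => simp [pok] at h
        | e :: cs' =>
          simp only [pok] at h
          obtain ⟨s', r, hs, hp⟩ := ihn cs' (by simp at hl; omega) (s ++
            (if e = 'n' then ['\n'] else if e = 't' then ['\t']
             else if e = '\"' then ['\"'] else if e = '\\' then ['\\'] else ['\\', e])) h
          refine ⟨s', r, ?_, hp⟩
          rw [scanStr.eq_def]
          simp only [if_pos rfl]
          rw [if_neg (by decide)]
          exact hs
      · by_cases hq : c = '\"'
        · subst hq
          simp only [pok, if_neg hb, if_pos rfl] at h
          exact ⟨s, cs, by rw [scanStr.eq_def]; simp, h⟩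
        · simp only [pok, if_neg hb, if_neg hq] at h
          obtain ⟨s', r, hs, hp⟩ := ihn cs (by simp at hl; omega) (s ++ [c]) h
          refine ⟨s', r, ?_, hp⟩
          rw [scanStr.eq_def]
          simp only [if_neg hq, if_neg hb]
          exact hs

theorem pok_str (l : List Char) : ∀ s, pok l 2 = true →
    ∃ s' r, scanStr l s = some (s', r) ∧ pok r 0 = true :=
  pok_str_aux l.length l le_rfl

theorem pok_word (l : List Char) : (';' ∈ l → False) → pok l 1 = true →
    pok (scanWord l).2 0 = true := by
  induction l with
  | nil => intro _ _; simp [scanWord, pok]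
  | cons c cs ih =>
    intro hsemi h
    by_cases hstop : (PySem.Chars.isspace c || c = ',' || c = ':') = true
    · have hsw : scanWord (c :: cs) = ([], c :: cs) := by simp [scanWord, hstop]
      rw [hsw]
      simp only [Bool.or_eq_true, decide_eq_true_eq] at hstop
      have hq : ¬ c = '\"' := by
        rcases hstop with (hs | rfl) | rfl
        · rintro rfl; rw [not_space_of_quote] at hs; exact Bool.false_ne_true hs
        · decide
        · decide
      simp only [pok, if_neg hq]
      simp only [pok] at h
      have hcond : (PySem.Chars.isspace c || decide (c = ',') || decide (c = ':')) = true := by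
        simp only [Bool.or_eq_true, decide_eq_true_eq]; exact hstop
      rw [hcond] at h ⊢
      exact h
    · have hc : ¬ c = ';' := fun hx => hsemi (hx ▸ List.mem_cons_self)
      simp only [Bool.or_eq_true, decide_eq_true_eq, not_or] at hstop
      obtain ⟨⟨hs, h1⟩, h2⟩ := hstop
      have hs' : PySem.Chars.isspace c = false := Bool.eq_false_iff.mpr hs
      have hsw : scanWord (c :: cs) = ((scanWord cs).1.cons c, (scanWord cs).2) := by
        simp [scanWord, hs', h1, h2, hc]
      rw [hsw]
      simp only [pok, hs', h1, h2] at h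
      simp only [decide_eq_true_eq, if_neg h1, if_neg h2, Bool.false_or] at h
      exact ih (fun hm => hsemi (List.mem_cons_of_mem c hm)) (by simpa using h)

theorem main_top (n : Nat) : ∀ l toks, l.length ≤ n → (';' ∈ l → False) → pok l 0 = true →
    finB (List.foldl stepB (toks, TokSt.top) l) = toks.reverse ++ loopA l := by
  induction n with
  | zero =>
    intro l toks hl _ _
    rw [List.length_eq_zero_iff.mp (Nat.le_zero.mp hl)]
    simp [finB, loopA]
  | succ n ihn =>
    intro l toks hl hsemi hpok
    match l with
    | [] => simp [finB, loopA]
    | c :: cs =>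
      have hlcs : cs.length ≤ n := by simp at hl; omega
      have hsemi' : ';' ∈ cs → False := fun hm => hsemi (List.mem_cons_of_mem c hm)
      by_cases hsp : PySem.Chars.isspace c = true
      · have hq : ¬ c = '\"' := by rintro rfl; rw [not_space_of_quote] at hsp; exact Bool.false_ne_true hsp
        have h1 : ¬ c = ',' := by rintro rfl; rw [not_space_of_comma] at hsp; exact Bool.false_ne_true hsp
        have h2 : ¬ c = ':' := by rintro rfl; rw [not_space_of_colon] at hsp; exact Bool.false_ne_true hsp
        have hpok' : pok cs 0 = true := by
          simp only [pok, if_neg hq, hsp, Bool.true_or, if_pos] at hpok; exact hpok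
        rw [loopA.eq_def]
        simp only [hsp, if_pos]
        simp only [List.foldl_cons]
        have hstep : stepB (toks, TokSt.top) c = (toks, TokSt.top) := by
          simp [stepB, hq, h1, h2, hsp]
        rw [hstep]
        exact ihn cs toks hlcs hsemi' hpok'
      · by_cases hq : c = '\"'
        · subst hq
          have hpok2 : pok cs 2 = true := by simpa [pok] using hpok
          obtain ⟨s', r, hs, hp⟩ := pok_str cs [] hpok2
          have hr : r <:+ cs := scanStr_rest cs [] s' r hs
          simp only [List.foldl_cons]
          have hstep : stepB (toks, TokSt.top) '\"' = (toks, TokSt.str [] false) := by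
            simp [stepB]
          rw [hstep, foldB_str cs [] toks s' r hs]
          rw [ihn r (("string", String.ofList s') :: toks) (hr.length_le.trans hlcs)
            (fun hm => hsemi' (hr.mem hm)) hp]
          have hL : loopA ('\"' :: cs) = ("string", String.ofList s') :: loopA r := by
            rw [loopA.eq_def]
            simp [not_space_of_quote]
            split
            · rename_i heq; rw [heq] at hs; cases hs
            · rename_i s2 r2 heq
              rw [heq] at hs
              simp only [Option.some.injEq, Prod.mk.injEq] at hs
              simp [hs.1, hs.2]
          rw [hL]
          simp
        · by_cases h1 : c = ','
          · subst h1
            have hpok' : pok cs 0 = true := by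
              simpa [pok, not_space_of_comma] using hpok
            rw [loopA.eq_def]
            simp only [not_space_of_comma, Bool.false_eq_true, if_false,
              if_neg (by decide : ¬ (',' : Char) = '\"'), if_pos rfl]
            simp only [List.foldl_cons]
            have hstep : stepB (toks, TokSt.top) ',' = (("comma", ",") :: toks, TokSt.top) := by
              simp [stepB]
            rw [hstep, ihn cs (("comma", ",") :: toks) hlcs hsemi' hpok']
            simp
          · by_cases h2 : c = ':'
            · subst h2
              have hpok' : pok cs 0 = true := by
                simpa [pok, not_space_of_colon] using hpok
              rw [loopA.eq_def]
              simp only [not_space_of_colon, Bool.false_eq_true, if_false,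
                if_neg (by decide : ¬ (':' : Char) = '\"'),
                if_neg (by decide : ¬ (':' : Char) = ','), if_pos rfl]
              simp only [List.foldl_cons]
              have hstep : stepB (toks, TokSt.top) ':' = (("colon", ":") :: toks, TokSt.top) := by
                simp [stepB]
              rw [hstep, ihn cs (("colon", ":") :: toks) hlcs hsemi' hpok']
              simp
            · have hs' : PySem.Chars.isspace c = false := Bool.eq_false_iff.mpr hsp
              have hpok' : pok cs 1 = true := by
                simp only [pok, if_neg hq, hs', decide_eq_true_eq, Bool.false_or] at hpok
                rwa [if_neg (by simp [h1, h2])] at hpok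
              rw [loopA.eq_def]
              simp only [hs', Bool.false_eq_true, if_false, if_neg hq, if_neg h1, if_neg h2]
              simp only [List.foldl_cons]
              have hstep : stepB (toks, TokSt.top) c = (toks, TokSt.word [c]) := by
                simp [stepB, hq, h1, h2, hs']
              rw [hstep, foldB_word cs toks [c] hsemi']
              by_cases hE : (scanWord cs).2.isEmpty = true
              · rw [if_pos hE]
                rw [List.isEmpty_iff.mp hE, loopA.eq_def]
                simp [finB]
              · rw [if_neg hE]
                have hr : (scanWord cs).2 <:+ cs := scanWord_rest cs
                rw [ihn (scanWord cs).2 (("word", String.ofList ([c] ++ (scanWord cs).1)) :: toks)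
                  (hr.length_le.trans hlcs) (fun hm => hsemi' (hr.mem hm))
                  (pok_word cs hsemi' hpok')]
                simp

-- ===== VERDICT (by name: the statement is the Claim_ definition above) =====
theorem tokenize_line_spec : Claim_equal_tokenize_line := by
  intro line _ hpre
  unfold Spec_tokenize_line tokenize_line tokenize_line_alt
  have hsemi : ';' ∈ PySem.Chars.rstrip (pvTrunc line.toList) → False := by
    intro hm
    simp only [PySem.Chars.rstrip, List.mem_reverse] at hm
    have h2 : ';' ∈ pvTrunc line.toList := by
      have := (List.dropWhile_sublist (p := PySem.Chars.isspace)
        (l := (pvTrunc line.toList).reverse)).mem hm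
      simpa using this
    have := List.mem_takeWhile_imp h2
    simp at this
  by_cases hE : (PySem.Chars.rstrip (pvTrunc line.toList)).isEmpty = true
  · rw [if_pos hE, List.isEmpty_iff.mp hE]
    simp [finB]
  · rw [if_neg hE]
    have := main_top (PySem.Chars.rstrip (pvTrunc line.toList)).length
      (PySem.Chars.rstrip (pvTrunc line.toList)) [] le_rfl hsemi hpre
    simpa using this.symm
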